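-- pv_equiv track=rewrite | github.com/SunnyYie/agent-flow-next | agent_flow/core/state_contract.py | serialize_marker_entry
-- ===== SOURCE A (Python) =====
-- DEFAULT_MARKER_FIELD_ORDER = ("phase", "status", "timestamp", "task", "confirmed_by", "summary")
--
-- def serialize_marker_entry(entry: dict[str, str]) -> str:
--     """Serialize a structured marker entry into stable key-value lines."""
--     ordered_keys: list[str] = []
--     for key in DEFAULT_MARKER_FIELD_ORDER:
--         if key in entry and str(entry.get(key, "")).strip():
--             ordered_keys.append(key)
--
--     extra_keys = sorted(
--         key for key, value in entry.items()
--         if key not in DEFAULT_MARKER_FIELD_ORDER and str(value).strip()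
--     )
--     ordered_keys.extend(extra_keys)
--     return "\n".join(f"{key}={entry[key]}" for key in ordered_keys)
-- ===== SOURCE B (Python) =====
-- DEFAULT_MARKER_FIELD_ORDER = ("phase", "status", "timestamp", "task", "confirmed_by", "summary")
--
-- def serialize_marker_entry(entry: dict[str, str]) -> str:
--     """Serialize a structured marker entry into stable key-value lines."""
--     rank = {key: i for i, key in enumerate(DEFAULT_MARKER_FIELD_ORDER)}
--     n = len(DEFAULT_MARKER_FIELD_ORDER)
--     keys = [key for key, value in entry.items() if str(value).strip()]
--     keys.sort(key=lambda k: (rank.get(k, n), "" if k in rank else k))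
--     return "\n".join(f"{key}={entry[key]}" for key in keys)
-- ===== Notes on version B (the rewrite author's own statement) =====
-- stated objective: simpler
-- what changed: A's two phases (a fixed-order membership loop over DEFAULT_MARKER_FIELD_ORDER plus a separately sorted extra-key comprehension, then extend) are replaced by one filtered key list sorted under a single composite (rank, name) key built from a rank map of the field order.
import Mathlib
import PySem

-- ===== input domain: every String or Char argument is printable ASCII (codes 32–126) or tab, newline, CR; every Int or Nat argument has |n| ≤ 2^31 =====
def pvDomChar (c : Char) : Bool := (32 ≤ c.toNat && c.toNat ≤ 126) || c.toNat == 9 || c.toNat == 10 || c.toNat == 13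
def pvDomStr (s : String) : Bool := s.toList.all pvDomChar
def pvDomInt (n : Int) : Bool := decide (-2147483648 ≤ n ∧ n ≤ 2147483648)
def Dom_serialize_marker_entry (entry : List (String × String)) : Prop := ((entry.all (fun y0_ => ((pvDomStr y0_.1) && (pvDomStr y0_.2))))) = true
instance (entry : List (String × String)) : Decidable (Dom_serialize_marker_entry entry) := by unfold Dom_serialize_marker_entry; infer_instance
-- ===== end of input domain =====

-- B replaces A's fixed-order pass plus separate sorted-extras pass by one filtered key list
-- sorted under a composite (rank, name) key built from the field-order table (objective: simpler).

def pvOrder : List String := ["phase", "status", "timestamp", "task", "confirmed_by", "summary"]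

-- ===== PORT A =====
def serialize_marker_entry (entry : List (String × String)) : String :=
  let d : PySem.Dict String String := PySem.Dict.mk entry
  let ordered : List String := pvOrder.foldl (fun acc key =>
      if d.contains key && !(PySem.Str.strip (d.getD key "") == "") then acc ++ [key] else acc) []
  let extras : List String := PySem.List.sorted
      (entry.filterMap (fun kv =>
        if !(pvOrder.contains kv.1) && !(PySem.Str.strip kv.2 == "") then some kv.1 else none))
      (fun k => k) false
  PySem.Str.join "\n" ((ordered ++ extras).map (fun key => key ++ "=" ++ d.getD key ""))

-- ===== PORT B =====
def serialize_marker_entry_alt (entry : List (String × String)) : String :=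
  let d : PySem.Dict String String := PySem.Dict.mk entry
  let rank : PySem.Dict String Int :=
    (PySem.List.enumerate pvOrder 0).foldl (fun r ik => r.insert ik.2 ik.1) PySem.Dict.empty
  let n : Int := (pvOrder.length : Int)
  let keys : List String := entry.filterMap (fun kv =>
      if !(PySem.Str.strip kv.2 == "") then some kv.1 else none)
  let skeys : List String := PySem.List.sorted2 keys
      (fun k => rank.getD k n) (fun k => if rank.contains k then "" else k) false
  PySem.Str.join "\n" (skeys.map (fun key => key ++ "=" ++ d.getD key ""))

-- ===== PRECONDITION & SPEC =====
-- Pre_ excludes association lists with duplicate keys: they do not represent a Python dict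
-- (the parameter's type), so neither program's behaviour there is specified by A.
def Pre_serialize_marker_entry (entry : List (String × String)) : Prop :=
  (entry.map Prod.fst).Nodup
instance (entry : List (String × String)) : Decidable (Pre_serialize_marker_entry entry) := by
  unfold Pre_serialize_marker_entry; infer_instance

def pvWitness_serialize_marker_entry : (List (String × String)) :=
  [("task", " build "), ("phase", "p1"), ("zeta", "9"), ("alpha", "a"), ("status", "   ")]

def Spec_serialize_marker_entry (entry : List (String × String)) (out : String) : Prop := out = serialize_marker_entry_alt entry
instance (entry : List (String × String)) (out : String) : Decidable (Spec_serialize_marker_entry entry out) := by unfold Spec_serialize_marker_entry; infer_instance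

-- ===== CLAIM (what is proved, stated in full; the proofs are below) =====
def Claim_equal_serialize_marker_entry : Prop := ∀ (entry : List (String × String)), Dom_serialize_marker_entry entry → Pre_serialize_marker_entry entry → Spec_serialize_marker_entry entry (serialize_marker_entry entry)

-- ===== LEMMAS AND PROOFS =====

-- the rank dictionary B builds, as a literal
def pvRankD : PySem.Dict String Int :=
  PySem.Dict.mk [("phase", 0), ("status", 1), ("timestamp", 2), ("task", 3), ("confirmed_by", 4), ("summary", 5)]

lemma pvRank_eval :
    (PySem.List.enumerate pvOrder 0).foldl (fun r ik => r.insert ik.2 ik.1) PySem.Dict.empty = pvRankD := by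
  decide

-- B's composite sort key, as one lexicographic key
def pvKey (k : String) : Lex (Int × String) :=
  toLex (pvRankD.getD k 6, if pvRankD.contains k then "" else k)

lemma sorted2_eq_sorted_toLex {α κ₁ κ₂ : Type} [LinearOrder κ₁] [LinearOrder κ₂]
    (xs : List α) (k1 : α → κ₁) (k2 : α → κ₂) :
    PySem.List.sorted2 xs k1 k2 false = PySem.List.sorted xs (fun x => toLex (k1 x, k2 x)) false := by
  rw [PySem.List.sorted_eq_foldl_insertBy]
  unfold PySem.List.sorted2
  simp only [if_neg (by decide : ¬ (false = true))]
  congr 1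
  funext acc x
  congr 1
  funext a b
  rcases lt_trichotomy (k1 a) (k1 b) with h | h | h
  · simp [h, Prod.Lex.toLex_lt_toLex]
  · simp [h, Prod.Lex.toLex_lt_toLex]
  · simp [not_lt_of_gt h, Prod.Lex.toLex_lt_toLex, h.ne']
    exact fun he => absurd he (not_le_of_gt h)

-- the keys B keeps: keys of entries with a non-blank value, in entry order
def pvKeep (entry : List (String × String)) : List String :=
  entry.filterMap (fun kv => if !(PySem.Str.strip kv.2 == "") then some kv.1 else none)

lemma pvKeep_sublist (entry : List (String × String)) :
    List.Sublist (pvKeep entry) (entry.map Prod.fst) := by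
  induction entry with
  | nil => simp [pvKeep]
  | cons kv t ih =>
    by_cases h : PySem.Str.strip kv.2 = ""
    · simp only [pvKeep, List.filterMap_cons, h, List.map_cons] at *
      simp only [beq_self_eq_true, Bool.not_true, if_neg (by simp : ¬ (false = true))]
      exact ih.cons kv.1
    · simp only [pvKeep, List.filterMap_cons, List.map_cons] at *
      rw [if_pos (by simp [h])]
      exact ih.cons₂ kv.1

lemma mem_pvKeep (entry : List (String × String)) (k : String) :
    k ∈ pvKeep entry ↔ ∃ v, (k, v) ∈ entry ∧ ¬ PySem.Str.strip v = "" := by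
  simp only [pvKeep, List.mem_filterMap]
  constructor
  · rintro ⟨kv, hmem, hf⟩
    by_cases h : PySem.Str.strip kv.2 = "" <;> simp [h] at hf
    exact ⟨kv.2, by simpa [← hf] using hmem, h⟩
  · rintro ⟨v, hmem, hv⟩
    exact ⟨(k, v), hmem, by simp [hv]⟩

lemma extras0_eq (entry : List (String × String)) :
    entry.filterMap (fun kv =>
        if !(pvOrder.contains kv.1) && !(PySem.Str.strip kv.2 == "") then some kv.1 else none)
      = (pvKeep entry).filter (fun k => !(pvOrder.contains k)) := by
  induction entry with
  | nil => rfl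
  | cons kv t ih =>
    simp [pvKeep] at ih
    by_cases h1 : PySem.Str.strip kv.2 = "" <;>
      by_cases h2 : kv.1 ∈ pvOrder <;>
        simp [pvKeep, h1, h2, ih]

lemma rank_keys : pvRankD.keys = pvOrder := by decide

lemma rank_contains (k : String) : pvRankD.contains k = pvOrder.contains k := by
  rw [PySem.Dict.contains_eq_decide_mem_keys, rank_keys]
  by_cases h : k ∈ pvOrder <;> simp [h]

lemma rank_getD_lt_of_mem {k : String} (h : k ∈ pvOrder) : pvRankD.getD k 6 < 6 := by
  fin_cases h <;> decide

lemma rank_getD_of_not_mem {k : String} (h : k ∉ pvOrder) : pvRankD.getD k 6 = 6 := by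
  apply PySem.Dict.getD_of_not_contains
  rw [rank_contains]
  simpa using h

lemma pvOrder_pairwise : pvOrder.Pairwise (fun a b => pvKey a < pvKey b) := by decide

lemma pvOrder_nodup : pvOrder.Nodup := by decide

-- membership bridge: A's per-key test (on the dict) ↔ membership in B's kept-key list
lemma cond_iff_mem_keep (entry : List (String × String))
    (hnd : (entry.map Prod.fst).Nodup) (k : String) :
    ((PySem.Dict.mk entry).contains k && !(PySem.Str.strip ((PySem.Dict.mk entry).getD k "") == "")) = true
      ↔ k ∈ pvKeep entry := by
  have hkeys : (PySem.Dict.mk entry).keys.Nodup := hnd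
  constructor
  · rintro hc
    simp only [Bool.and_eq_true, PySem.Dict.contains_eq_isSome_get?, Option.isSome_iff_exists] at hc
    obtain ⟨⟨v, hv⟩, hstrip⟩ := hc
    have hmem : (k, v) ∈ entry :=
      ((PySem.Dict.get?_eq_some_iff_mem_items (PySem.Dict.mk entry) k v hkeys).mp hv)
    rw [PySem.Dict.getD_of_get?_eq_some _ _ hv] at hstrip
    exact (mem_pvKeep entry k).mpr ⟨v, hmem, by simpa using hstrip⟩
  · intro hk
    obtain ⟨v, hmem, hv⟩ := (mem_pvKeep entry k).mp hk
    have hget : (PySem.Dict.mk entry).get? k = some v :=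
      PySem.Dict.get?_of_mem_items (PySem.Dict.mk entry) hmem hkeys
    simp [PySem.Dict.contains_eq_isSome_get?, hget,
      PySem.Dict.getD_of_get?_eq_some _ _ hget, hv]

-- the central list identity: B's single composite-key sort equals A's two phases
lemma keylist_eq (entry : List (String × String)) (hnd : (entry.map Prod.fst).Nodup) :
    PySem.List.sorted2 (pvKeep entry)
        (fun k => pvRankD.getD k 6) (fun k => if pvRankD.contains k then "" else k) false
      = pvOrder.filter (fun key =>
            (PySem.Dict.mk entry).contains key
              && !(PySem.Str.strip ((PySem.Dict.mk entry).getD key "") == ""))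
        ++ PySem.List.sorted ((pvKeep entry).filter (fun k => !(pvOrder.contains k)))
            (fun k => k) false := by
  rw [sorted2_eq_sorted_toLex]
  have hkeep_nd : (pvKeep entry).Nodup := (pvKeep_sublist entry).nodup hnd
  set q : String → Bool := fun key =>
    (PySem.Dict.mk entry).contains key
      && !(PySem.Str.strip ((PySem.Dict.mk entry).getD key "") == "") with hq
  set ex : List String := (pvKeep entry).filter (fun k => !(pvOrder.contains k)) with hex
  have hex_nd : ex.Nodup := hkeep_nd.filter _
  have hsx_perm : (PySem.List.sorted ex (fun k => k) false).Perm ex :=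
    PySem.List.sorted_perm ex _ false
  have hsx_nd : (PySem.List.sorted ex (fun k => k) false).Nodup :=
    hsx_perm.nodup_iff.mpr hex_nd
  have hmem_sx : ∀ x ∈ PySem.List.sorted ex (fun k => k) false, x ∉ pvOrder := by
    intro x hx
    have hx' : x ∈ ex := (PySem.List.mem_sorted ex _ false x).mp hx
    rw [hex] at hx'
    simpa using (List.of_mem_filter hx')
  have hfq_nd : (pvOrder.filter q).Nodup := pvOrder_nodup.filter q
  have hperm1 : (pvOrder.filter q).Perm
      ((pvKeep entry).filter (fun k => pvOrder.contains k)) := by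
    rw [List.perm_ext_iff_of_nodup hfq_nd (hkeep_nd.filter _)]
    intro a
    simp only [List.mem_filter]
    constructor
    · rintro ⟨ha, hqa⟩
      exact ⟨(cond_iff_mem_keep entry hnd a).mp hqa, by simpa using ha⟩
    · rintro ⟨ha, hmemo⟩
      exact ⟨by simpa using hmemo, (cond_iff_mem_keep entry hnd a).mpr ha⟩
  have hperm : (pvOrder.filter q ++ PySem.List.sorted ex (fun k => k) false).Perm
      (pvKeep entry) := by
    refine (List.Perm.append hperm1 hsx_perm).trans ?_
    rw [hex]
    exact List.filter_append_perm _ _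
  refine PySem.List.sorted_eq_of_perm_of_pairwise_lt _ _ _ hperm ?_
  rw [List.pairwise_append]
  refine ⟨?_, ?_, ?_⟩
  · have := List.Pairwise.sublist (List.filter_sublist : (pvOrder.filter q).Sublist pvOrder) pvOrder_pairwise
    simpa [pvKey] using this
  · have hle : List.Pairwise (fun a b : String => a ≤ b)
        (PySem.List.sorted ex (fun k => k) false) := by
      simpa using PySem.List.sorted_pairwise ex (fun k => k)
    have hand := hle.and hsx_nd
    refine hand.imp_of_mem ?_
    rintro a b ha hb ⟨hab, hneq⟩
    have hna : a ∉ pvOrder := hmem_sx a ha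
    have hnb : b ∉ pvOrder := hmem_sx b hb
    have hca : pvRankD.contains a = false := by
      rw [rank_contains]; simpa using hna
    have hcb : pvRankD.contains b = false := by
      rw [rank_contains]; simpa using hnb
    refine Prod.Lex.toLex_lt_toLex.mpr (Or.inr ⟨?_, ?_⟩)
    · simp [rank_getD_of_not_mem hna, rank_getD_of_not_mem hnb]
    · simp only [hca, hcb, Bool.false_eq_true, if_false]
      exact lt_of_le_of_ne hab hneq
  · intro a ha b hb
    have hao : a ∈ pvOrder := (List.mem_filter.mp ha).1
    have hbo : b ∉ pvOrder := hmem_sx b hb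
    refine Prod.Lex.toLex_lt_toLex.mpr (Or.inl ?_)
    simp only
    rw [rank_getD_of_not_mem hbo]
    exact rank_getD_lt_of_mem hao

theorem serialize_marker_entry_spec : Claim_equal_serialize_marker_entry := by
  intro entry hdom hpre
  unfold Spec_serialize_marker_entry serialize_marker_entry serialize_marker_entry_alt
  dsimp only
  rw [pvRank_eval, extras0_eq]
  rw [show ((pvOrder.length : Nat) : Int) = 6 from by decide]
  rw [show entry.filterMap (fun kv => if !(PySem.Str.strip kv.2 == "") then some kv.1 else none)
        = pvKeep entry from rfl]
  rw [keylist_eq entry hpre]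
  rw [PySem.List.foldl_append_if
    (fun key => (PySem.Dict.mk entry).contains key
      && !(PySem.Str.strip ((PySem.Dict.mk entry).getD key "") == "")) (fun k => k) pvOrder []]
  simp
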